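-- pv_equiv track=rewrite | github.com/NIH-HPC/pbs2slurm | pbs2slurm.py | fix_env_vars
-- ===== SOURCE A (Python) =====
-- def fix_env_vars(input):
--     """replace PBS environment variables with their SLURM equivalent"""
--     repl = {
--         "PBS_O_WORKDIR": "SLURM_SUBMIT_DIR",
--         "PBS_JOBID"    : "SLURM_JOBID",
--         "PBS_ARRAY_INDEX"  : "SLURM_ARRAY_TASK_ID"}
--     output = input
--     for pbs, slurm in repl.items():
--         output = output.replace(pbs, slurm)
--     return output
-- ===== SOURCE B (Python) =====
-- def fix_env_vars(input):
--     """replace PBS environment variables with their SLURM equivalent"""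
--     repl = (
--         ("PBS_O_WORKDIR", "SLURM_SUBMIT_DIR"),
--         ("PBS_JOBID", "SLURM_JOBID"),
--         ("PBS_ARRAY_INDEX", "SLURM_ARRAY_TASK_ID"))
--     out = []
--     i = 0
--     n = len(input)
--     while i < n:
--         for pbs, slurm in repl:
--             if input.startswith(pbs, i):
--                 out.append(slurm)
--                 i += len(pbs)
--                 break
--         else:
--             out.append(input[i])
--             i += 1
--     return "".join(out)
-- ===== Notes on version B (the rewrite author's own statement) =====
-- stated objective: alternative
-- what changed: Three sequential full-string replace passes are replaced by one left-to-right scan that tries each PBS key at the current position and substitutes in place, traversing the input once.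
import Mathlib
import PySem

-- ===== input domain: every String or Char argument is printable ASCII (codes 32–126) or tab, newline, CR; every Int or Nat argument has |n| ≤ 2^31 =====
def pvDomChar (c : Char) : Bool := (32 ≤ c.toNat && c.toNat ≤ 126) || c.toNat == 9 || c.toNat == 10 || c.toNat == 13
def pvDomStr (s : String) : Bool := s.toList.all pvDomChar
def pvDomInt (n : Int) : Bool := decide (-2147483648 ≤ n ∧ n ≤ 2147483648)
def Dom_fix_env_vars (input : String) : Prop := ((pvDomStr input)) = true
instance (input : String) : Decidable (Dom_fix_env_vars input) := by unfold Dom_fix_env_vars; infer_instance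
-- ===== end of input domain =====

-- B replaces A's three sequential full-string replace passes by a single left-to-right scan
-- that tries each PBS key at the current position and substitutes in place (objective: alternative).


-- ===== PORT A =====
def fix_env_vars (input : String) : String :=
  let output := input
  let output := PySem.Str.replace output "PBS_O_WORKDIR" "SLURM_SUBMIT_DIR"
  let output := PySem.Str.replace output "PBS_JOBID" "SLURM_JOBID"
  let output := PySem.Str.replace output "PBS_ARRAY_INDEX" "SLURM_ARRAY_TASK_ID"
  output

-- ===== PORT B =====
-- single pass: at each position try the three keys in order (input.startswith(pbs, i));
-- on a match emit the SLURM name and skip the key, else emit the character and advance by one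
def scanGo : List Char → List Char
  | [] => []
  | c :: t =>
    if List.isPrefixOf "PBS_O_WORKDIR".toList (c :: t) then
      "SLURM_SUBMIT_DIR".toList ++ scanGo (t.drop 12)
    else if List.isPrefixOf "PBS_JOBID".toList (c :: t) then
      "SLURM_JOBID".toList ++ scanGo (t.drop 8)
    else if List.isPrefixOf "PBS_ARRAY_INDEX".toList (c :: t) then
      "SLURM_ARRAY_TASK_ID".toList ++ scanGo (t.drop 14)
    else c :: scanGo t
  termination_by l => l.length
  decreasing_by all_goals (simp; try omega)

def fix_env_vars_alt (input : String) : String :=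
  String.ofList (scanGo input.toList)

-- ===== PRECONDITION & SPEC =====
def Spec_fix_env_vars (input : String) (out : String) : Prop := out = fix_env_vars_alt input
instance (input : String) (out : String) : Decidable (Spec_fix_env_vars input out) := by unfold Spec_fix_env_vars; infer_instance

-- ===== CLAIM (what is proved, stated in full; the proofs are below) =====
def Claim_equal_fix_env_vars : Prop := ∀ (input : String), Dom_fix_env_vars input → Spec_fix_env_vars input (fix_env_vars input)

-- ===== LEMMAS AND PROOFS =====

-- clean recursive form of one replace pass (equals PySem.Chars.replace for old ≠ [])
def repR (old new : List Char) : List Char → List Char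
  | [] => []
  | c :: t =>
    if List.isPrefixOf old (c :: t) then new ++ repR old new (t.drop (old.length - 1))
    else c :: repR old new t
  termination_by l => l.length
  decreasing_by all_goals (simp; try omega)

theorem repR_nil (old new : List Char) : repR old new [] = [] := by simp [repR]

theorem repR_cons_pos (old new : List Char) (c : Char) (t : List Char)
    (h : old <+: (c :: t)) :
    repR old new (c :: t) = new ++ repR old new (t.drop (old.length - 1)) := by
  rw [repR, if_pos (List.isPrefixOf_iff_prefix.mpr h)]

theorem repR_cons_neg (old new : List Char) (c : Char) (t : List Char)
    (h : ¬ old <+: (c :: t)) :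
    repR old new (c :: t) = c :: repR old new t := by
  rw [repR, if_neg (by simpa [List.isPrefixOf_iff_prefix] using h)]

theorem go_eq_repR (old new : List Char) (hold : old ≠ []) :
    ∀ (fuel : Nat) (l acc : List Char), l.length ≤ fuel →
      PySem.Chars.replace.go old new fuel l acc = acc.reverse ++ repR old new l := by
  intro fuel
  induction fuel with
  | zero =>
    intro l acc hl
    have : l = [] := List.eq_nil_of_length_eq_zero (Nat.le_zero.mp hl)
    subst this
    simp [PySem.Chars.replace.go, repR_nil]
  | succ n ih =>
    intro l acc hl
    match l with
    | [] => simp [PySem.Chars.replace.go, repR_nil]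
    | c :: t =>
      rw [PySem.Chars.replace.go]
      by_cases h : List.isPrefixOf old (c :: t)
      · simp only [h, if_true]
        have hlen : 1 ≤ old.length := by
          cases old with
          | nil => exact absurd rfl hold
          | cons a b => simp
        have hdrop : List.drop old.length (c :: t) = t.drop (old.length - 1) := by
          cases old with
          | nil => exact absurd rfl hold
          | cons a b => simp
        have hle : (List.drop old.length (c :: t)).length ≤ n := by
          simp only [List.length_drop, List.length_cons]
          simp only [List.length_cons] at hl
          omega
        rw [ih _ _ hle, hdrop, repR_cons_pos old new c t (List.isPrefixOf_iff_prefix.mp h)]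
        simp
      · simp only [h]
        have hle : t.length ≤ n := by simp only [List.length_cons] at hl; omega
        rw [if_neg (by simp), ih _ _ hle,
          repR_cons_neg old new c t (fun hh => h (List.isPrefixOf_iff_prefix.mpr hh))]
        simp

theorem replace_eq_repR (s old new : List Char) (hold : old ≠ []) :
    PySem.Chars.replace s old new = repR old new s := by
  rw [PySem.Chars.replace, if_neg (by simp [hold]), go_eq_repR old new hold s.length s [] le_rfl]
  simp

-- prefix of a concatenation: the prefix restricted to the first block
theorem prefix_take_of_prefix_append (p a b : List Char) (h : p <+: a ++ b) :
    p.take a.length <+: a := by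
  have := h.take a.length
  simpa [List.take_append] using this

theorem prefix_or_of_prefix_append (p a b : List Char) (h : p <+: a ++ b) :
    p <+: a ∨ a <+: p := by
  have ht := prefix_take_of_prefix_append p a b h
  by_cases hl : p.length ≤ a.length
  · left; rwa [List.take_of_length_le hl] at ht
  · right
    have hlen : (p.take a.length).length = a.length := by
      simp [Nat.min_def]; omega
    have heq : p.take a.length = a := List.IsPrefix.eq_of_length ht hlen
    rw [← heq]
    exact List.take_prefix _ _

-- a block u in which old can match at no offset passes through repR unchanged
theorem repR_append (old new u x : List Char)
    (h : ∀ i, i < u.length → ¬ old <+: u.drop i ∧ ¬ u.drop i <+: old) :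
    repR old new (u ++ x) = u ++ repR old new x := by
  induction u with
  | nil => simp
  | cons c u' ih =>
    have h0 := h 0 (by simp)
    simp only [List.drop_zero] at h0
    have hnp : ¬ old <+: (c :: (u' ++ x)) := by
      intro hp
      rcases prefix_or_of_prefix_append old (c :: u') x (by simpa using hp) with h1 | h1
      · exact h0.1 h1
      · exact h0.2 h1
    have ih' := ih (fun i hi => by
      simpa using h (i + 1) (by simp only [List.length_cons]; omega))
    rw [List.cons_append, repR_cons_neg old new c (u' ++ x) hnp, ih']
    simp

theorem repR_self_prefix (old new x : List Char) (hold : old ≠ []) :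
    repR old new (old ++ x) = new ++ repR old new x := by
  match old with
  | [] => exact absurd rfl hold
  | a :: o =>
    rw [List.cons_append, repR_cons_pos (a :: o) new a (o ++ x) (by simp [List.prefix_append])]
    congr 2
    simp

-- a key that was not a prefix of the input, and cannot start inside the replacement,
-- is not a prefix of the output of one replace pass
theorem prefix_repR (old new : List Char) :
    ∀ (n : Nat) (s : List Char), s.length ≤ n → ∀ (key : List Char), key <+: repR old new s →
      key <+: s ∨ ∃ j, j < key.length ∧ (key.drop j).take new.length <+: new := by
  intro n
  induction n with
  | zero =>
    intro s hs key hk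
    have : s = [] := List.eq_nil_of_length_eq_zero (Nat.le_zero.mp hs)
    subst this
    rw [repR_nil] at hk
    left; exact hk
  | succ n ih =>
    intro s hs key hk
    match s with
    | [] => rw [repR_nil] at hk; left; exact hk
    | c :: t =>
      by_cases h : old <+: (c :: t)
      · rw [repR_cons_pos old new c t h] at hk
        match key with
        | [] => left; exact List.nil_prefix
        | k :: ks =>
          right
          exact ⟨0, by simp, by simpa using prefix_take_of_prefix_append _ new _ hk⟩
      · rw [repR_cons_neg old new c t h] at hk
        match key with
        | [] => left; exact List.nil_prefix
        | k :: ks =>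
          rcases List.cons_prefix_cons.mp hk with ⟨rfl, hks⟩
          have hle : t.length ≤ n := by simp only [List.length_cons] at hs; omega
          rcases ih t hle ks hks with h1 | ⟨j, hj, hp⟩
          · left; exact List.cons_prefix_cons.mpr ⟨rfl, h1⟩
          · right
            exact ⟨j + 1, by simp only [List.length_cons]; omega, by simpa using hp⟩

theorem not_prefix_repR (old new s key : List Char)
    (hkey : ¬ key <+: s)
    (hnew : ∀ j, j < key.length → ¬ (key.drop j).take new.length <+: new) :
    ¬ key <+: repR old new s := by
  intro hk
  rcases prefix_repR old new s.length s le_rfl key hk with h | ⟨j, hj, hp⟩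
  · exact hkey h
  · exact hnew j hj hp

-- clean equations for scanGo
theorem scanGo_nil : scanGo [] = [] := by simp [scanGo]

theorem scanGo_cons_k1 (c : Char) (t : List Char)
    (h1 : "PBS_O_WORKDIR".toList <+: (c :: t)) :
    scanGo (c :: t) = "SLURM_SUBMIT_DIR".toList ++ scanGo ((c :: t).drop 13) := by
  rw [scanGo, if_pos (List.isPrefixOf_iff_prefix.mpr h1)]
  rw [show (13 : Nat) = 12 + 1 from rfl, List.drop_succ_cons]

theorem scanGo_cons_k2 (c : Char) (t : List Char)
    (h1 : ¬ "PBS_O_WORKDIR".toList <+: (c :: t))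
    (h2 : "PBS_JOBID".toList <+: (c :: t)) :
    scanGo (c :: t) = "SLURM_JOBID".toList ++ scanGo ((c :: t).drop 9) := by
  rw [scanGo, if_neg (by simpa [List.isPrefixOf_iff_prefix] using h1),
    if_pos (List.isPrefixOf_iff_prefix.mpr h2)]
  rw [show (9 : Nat) = 8 + 1 from rfl, List.drop_succ_cons]

theorem scanGo_cons_k3 (c : Char) (t : List Char)
    (h1 : ¬ "PBS_O_WORKDIR".toList <+: (c :: t))
    (h2 : ¬ "PBS_JOBID".toList <+: (c :: t))
    (h3 : "PBS_ARRAY_INDEX".toList <+: (c :: t)) :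
    scanGo (c :: t) = "SLURM_ARRAY_TASK_ID".toList ++ scanGo ((c :: t).drop 15) := by
  rw [scanGo, if_neg (by simpa [List.isPrefixOf_iff_prefix] using h1),
    if_neg (by simpa [List.isPrefixOf_iff_prefix] using h2),
    if_pos (List.isPrefixOf_iff_prefix.mpr h3)]
  rw [show (15 : Nat) = 14 + 1 from rfl, List.drop_succ_cons]

theorem scanGo_cons_none (c : Char) (t : List Char)
    (h1 : ¬ "PBS_O_WORKDIR".toList <+: (c :: t))
    (h2 : ¬ "PBS_JOBID".toList <+: (c :: t))
    (h3 : ¬ "PBS_ARRAY_INDEX".toList <+: (c :: t)) :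
    scanGo (c :: t) = c :: scanGo t := by
  rw [scanGo, if_neg (by simpa [List.isPrefixOf_iff_prefix] using h1),
    if_neg (by simpa [List.isPrefixOf_iff_prefix] using h2),
    if_neg (by simpa [List.isPrefixOf_iff_prefix] using h3)]

-- the main composition lemma: three sequential replace passes = one scan
theorem composition_eq_scan :
    ∀ (n : Nat) (l : List Char), l.length ≤ n →
      repR "PBS_ARRAY_INDEX".toList "SLURM_ARRAY_TASK_ID".toList
        (repR "PBS_JOBID".toList "SLURM_JOBID".toList
          (repR "PBS_O_WORKDIR".toList "SLURM_SUBMIT_DIR".toList l)) = scanGo l := by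
  intro n
  induction n with
  | zero =>
    intro l hl
    have : l = [] := List.eq_nil_of_length_eq_zero (Nat.le_zero.mp hl)
    subst this
    simp [repR_nil, scanGo_nil]
  | succ n ih =>
    intro l hl
    match l with
    | [] => simp [repR_nil, scanGo_nil]
    | c :: t =>
      by_cases h1 : "PBS_O_WORKDIR".toList <+: (c :: t)
      · obtain ⟨m, hm⟩ := id h1
        have hdrop : (c :: t).drop 13 = m := by
          rw [← hm, show (13 : Nat) = ("PBS_O_WORKDIR".toList).length from by decide, List.drop_left]
        have hmlen : m.length ≤ n := by
          have := congrArg List.length hm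
          simp only [List.length_cons, List.length_append] at this
          simp only [List.length_cons] at hl
          have h13 : ("PBS_O_WORKDIR".toList).length = 13 := by decide
          omega
        have e1 : repR "PBS_O_WORKDIR".toList "SLURM_SUBMIT_DIR".toList (c :: t)
            = "SLURM_SUBMIT_DIR".toList ++ repR "PBS_O_WORKDIR".toList "SLURM_SUBMIT_DIR".toList m := by
          rw [← hm, repR_self_prefix _ _ _ (by decide)]
        rw [e1,
          repR_append "PBS_JOBID".toList "SLURM_JOBID".toList "SLURM_SUBMIT_DIR".toList _ (by decide),
          repR_append "PBS_ARRAY_INDEX".toList "SLURM_ARRAY_TASK_ID".toList "SLURM_SUBMIT_DIR".toList _ (by decide),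
          ih m hmlen, scanGo_cons_k1 c t h1, hdrop]
      · by_cases h2 : "PBS_JOBID".toList <+: (c :: t)
        · obtain ⟨m, hm⟩ := id h2
          have hdrop : (c :: t).drop 9 = m := by
            rw [← hm, show (9 : Nat) = ("PBS_JOBID".toList).length from by decide, List.drop_left]
          have hmlen : m.length ≤ n := by
            have := congrArg List.length hm
            simp only [List.length_cons, List.length_append] at this
            simp only [List.length_cons] at hl
            have h9 : ("PBS_JOBID".toList).length = 9 := by decide
            omega
          have e1 : repR "PBS_O_WORKDIR".toList "SLURM_SUBMIT_DIR".toList (c :: t)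
              = "PBS_JOBID".toList ++ repR "PBS_O_WORKDIR".toList "SLURM_SUBMIT_DIR".toList m := by
            rw [← hm, repR_append _ _ _ _ (by decide)]
          rw [e1, repR_self_prefix _ _ _ (by decide),
            repR_append "PBS_ARRAY_INDEX".toList "SLURM_ARRAY_TASK_ID".toList "SLURM_JOBID".toList _ (by decide),
            ih m hmlen, scanGo_cons_k2 c t h1 h2, hdrop]
        · by_cases h3 : "PBS_ARRAY_INDEX".toList <+: (c :: t)
          · obtain ⟨m, hm⟩ := id h3
            have hdrop : (c :: t).drop 15 = m := by
              rw [← hm, show (15 : Nat) = ("PBS_ARRAY_INDEX".toList).length from by decide, List.drop_left]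
            have hmlen : m.length ≤ n := by
              have := congrArg List.length hm
              simp only [List.length_cons, List.length_append] at this
              simp only [List.length_cons] at hl
              have h15 : ("PBS_ARRAY_INDEX".toList).length = 15 := by decide
              omega
            have e1 : repR "PBS_O_WORKDIR".toList "SLURM_SUBMIT_DIR".toList (c :: t)
                = "PBS_ARRAY_INDEX".toList ++ repR "PBS_O_WORKDIR".toList "SLURM_SUBMIT_DIR".toList m := by
              rw [← hm, repR_append _ _ _ _ (by decide)]
            have e2 : repR "PBS_JOBID".toList "SLURM_JOBID".toList
                ("PBS_ARRAY_INDEX".toList ++ repR "PBS_O_WORKDIR".toList "SLURM_SUBMIT_DIR".toList m)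
                = "PBS_ARRAY_INDEX".toList ++ repR "PBS_JOBID".toList "SLURM_JOBID".toList
                    (repR "PBS_O_WORKDIR".toList "SLURM_SUBMIT_DIR".toList m) := by
              rw [repR_append _ _ _ _ (by decide)]
            rw [e1, e2, repR_self_prefix _ _ _ (by decide),
              ih m hmlen, scanGo_cons_k3 c t h1 h2 h3, hdrop]
          · have e1 : repR "PBS_O_WORKDIR".toList "SLURM_SUBMIT_DIR".toList (c :: t)
                = c :: repR "PBS_O_WORKDIR".toList "SLURM_SUBMIT_DIR".toList t :=
              repR_cons_neg _ _ c t h1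
            have hq2 : ¬ "PBS_JOBID".toList <+:
                repR "PBS_O_WORKDIR".toList "SLURM_SUBMIT_DIR".toList (c :: t) :=
              not_prefix_repR _ _ _ _ h2 (by decide)
            have hq3a : ¬ "PBS_ARRAY_INDEX".toList <+:
                repR "PBS_O_WORKDIR".toList "SLURM_SUBMIT_DIR".toList (c :: t) :=
              not_prefix_repR _ _ _ _ h3 (by decide)
            have hq3 : ¬ "PBS_ARRAY_INDEX".toList <+:
                repR "PBS_JOBID".toList "SLURM_JOBID".toList
                  (repR "PBS_O_WORKDIR".toList "SLURM_SUBMIT_DIR".toList (c :: t)) :=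
              not_prefix_repR _ _ _ _ hq3a (by decide)
            rw [e1] at hq2 hq3
            have e2 : repR "PBS_JOBID".toList "SLURM_JOBID".toList
                (c :: repR "PBS_O_WORKDIR".toList "SLURM_SUBMIT_DIR".toList t)
                = c :: repR "PBS_JOBID".toList "SLURM_JOBID".toList
                    (repR "PBS_O_WORKDIR".toList "SLURM_SUBMIT_DIR".toList t) :=
              repR_cons_neg _ _ c _ hq2
            rw [e2] at hq3
            have hle : t.length ≤ n := by simp only [List.length_cons] at hl; omega
            rw [e1, e2, repR_cons_neg _ _ c _ hq3, ih t hle,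
              scanGo_cons_none c t h1 h2 h3]

-- ===== VERDICT (by name: the statement is the Claim_ definition above) =====
theorem fix_env_vars_spec : Claim_equal_fix_env_vars := by
  intro input _
  unfold Spec_fix_env_vars fix_env_vars fix_env_vars_alt
  apply String.toList_inj.mp
  rw [String.toList_ofList, PySem.Str.toList_replace, PySem.Str.toList_replace,
    PySem.Str.toList_replace]
  rw [replace_eq_repR input.toList "PBS_O_WORKDIR".toList "SLURM_SUBMIT_DIR".toList (by decide)]
  rw [replace_eq_repR _ "PBS_JOBID".toList "SLURM_JOBID".toList (by decide)]
  rw [replace_eq_repR _ "PBS_ARRAY_INDEX".toList "SLURM_ARRAY_TASK_ID".toList (by decide)]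
  exact composition_eq_scan input.toList.length input.toList le_rfl
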